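-- pv_equiv track=rewrite | github.com/Di3go0-0/Sudoku.Killer | solver/solver.py | validate_nonets
-- ===== SOURCE A (Python) =====
-- Board = list[list[int]]
--
-- def find_nonet_range(coord: int) -> range:
--     """ Encuentra el rango de un noneto a lo largo de un solo eje.
--
--     Los primeros 3 campos a lo largo de un eje son iguales al noneto que reside en el rango [0;3[. El
--     siguiente grupo de 3 campos es igual al rango [3;6[ y los últimos 3 campos son iguales a [6:9[. Ya que esto es igual para ambos ejes,
--     este método se llama para un solo eje cada vez.
--
--     :param coord: La coordenada con base cero a lo largo de un eje
--     :return: Devuelve el rango utilizado por el noneto a lo largo del eje específico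
--     """
--     if coord < 3:
--         return range(0, 3)
--     if coord < 6:
--         return range(3, 6)
--     return range(6, 9)
--
-- def validate_nonets(board: Board) -> bool:
--     """ Valida los nonetes en el tablero, verificando que no existan duplicados en un nonet.
--
--     Solo se validarán las celdas completadas, lo que significa que un nonet medio completado puede ser válido siempre y cuando
--     no contenga duplicados. Este método solo busca duplicados y detiene la búsqueda
--     tan pronto como descubre uno.
--
--     :param board: El tablero a validar
--     :return: Devuelve un booleano Verdadero si no existen duplicados en ningún nonet
--     """
--     for nonet_x in range(0, 9, 3):
--         range_x = find_nonet_range(nonet_x)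
--         for nonet_y in range(0, 9, 3):
--             nonet_set = set()
--             for y in find_nonet_range(nonet_y):
--                 for x in range_x:
--                     value = board[y][x]
--                     if value != 0:
--                         if value in nonet_set:
--                             return False
--                         nonet_set.add(value)
--     return True
-- ===== SOURCE B (Python) =====
-- Board = list[list[int]]
--
-- def validate_nonets(board: Board) -> bool:
--     """Brute-force pairwise check, no auxiliary sets: one flat pass over a
--     precomputed cell list; each nonzero value is compared directly with every
--     earlier cell of its nonet (the slice cells[j - j % 9 : j])."""
--     cells = [(y, x)
--              for x0 in (0, 3, 6) for y0 in (0, 3, 6)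
--              for y in range(y0, y0 + 3) for x in range(x0, x0 + 3)]
--     for j, (y, x) in enumerate(cells):
--         v = board[y][x]
--         if v != 0 and any(board[y2][x2] == v for y2, x2 in cells[j - j % 9:j]):
--             return False
--     return True
-- ===== Notes on version B (the rewrite author's own statement) =====
-- stated objective: alternative
-- what changed: Replaces A's four nested loops with an incremental per-nonet hash set (and the find_nonet_range helper) by a brute-force pairwise check with no auxiliary data structure: one flat pass over a precomputed list of the 81 cell coordinates, comparing each nonzero value directly with every earlier cell of its nonet via the slice cells[j - j % 9 : j].
import Mathlib
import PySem

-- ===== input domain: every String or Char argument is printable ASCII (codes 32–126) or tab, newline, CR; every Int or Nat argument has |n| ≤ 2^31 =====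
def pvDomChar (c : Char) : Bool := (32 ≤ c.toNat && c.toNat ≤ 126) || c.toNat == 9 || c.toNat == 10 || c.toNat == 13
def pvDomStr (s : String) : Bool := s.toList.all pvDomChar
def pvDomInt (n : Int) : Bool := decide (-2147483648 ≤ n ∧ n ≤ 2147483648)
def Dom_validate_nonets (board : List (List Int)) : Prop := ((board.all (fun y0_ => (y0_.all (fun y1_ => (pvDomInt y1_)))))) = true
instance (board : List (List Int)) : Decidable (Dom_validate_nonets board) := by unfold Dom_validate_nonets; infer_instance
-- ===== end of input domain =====

-- B replaces A's incremental per-nonet hash-set scan by a brute-force pairwise check with no auxiliary structure: one flat pass over a precomputed cell list, comparing each nonzero value directly with its nonet's earlier cells; neither version mutates its argument.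

-- ===== PORT A =====
-- board[y][x]; total form of the double index (Pre_ keeps every index A reaches in range)
def pvCell (board : List (List Int)) (y x : Int) : Int :=
  PySem.List.pyGetD (PySem.List.pyGetD board y []) x 0

def find_nonet_range (coord : Int) : List Int :=
  if coord < 3 then PySem.List.pyRange 0 3 1
  else if coord < 6 then PySem.List.pyRange 3 6 1
  else PySem.List.pyRange 6 9 1

-- inner 'for x in range_x' loop: none = the 'return False' early exit
def pvRowLoop (board : List (List Int)) (y : Int) (xs : List Int) (s : PySem.Set Int) :
    Option (PySem.Set Int) :=
  match xs with
  | [] => some s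
  | x :: rest =>
    let value := pvCell board y x
    if value ≠ 0 then
      if PySem.Set.contains s value then none
      else pvRowLoop board y rest (PySem.Set.add s value)
    else pvRowLoop board y rest s

-- 'for y in find_nonet_range(nonet_y)' loop, threading nonet_set
def pvNonetLoop (board : List (List Int)) (ys xs : List Int) (s : PySem.Set Int) : Bool :=
  match ys with
  | [] => true
  | y :: rest =>
    match pvRowLoop board y xs s with
    | none => false
    | some s' => pvNonetLoop board rest xs s'

def validate_nonets (board : List (List Int)) : Bool :=
  (PySem.List.pyRange 0 9 3).all (fun nonet_x =>
    let range_x := find_nonet_range nonet_x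
    (PySem.List.pyRange 0 9 3).all (fun nonet_y =>
      pvNonetLoop board (find_nonet_range nonet_y) range_x PySem.Set.empty))

-- ===== PORT B =====
-- the 'cells' comprehension of Source B
def pvCellsB : List (Int × Int) :=
  ([0, 3, 6] : List Int).flatMap (fun x0 =>
    ([0, 3, 6] : List Int).flatMap (fun y0 =>
      (PySem.List.pyRange y0 (y0 + 3) 1).flatMap (fun y =>
        (PySem.List.pyRange x0 (x0 + 3) 1).map (fun x => (y, x)))))

-- 'for j, (y, x) in enumerate(cells)' with the early 'return False';
-- 'any(board[y2][x2] == v for y2, x2 in cells[j - j % 9:j])' is the backward pairwise scan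
def pvBLoop (board : List (List Int)) (cs : List (Int × (Int × Int))) : Bool :=
  match cs with
  | [] => true
  | (j, yx) :: rest =>
    let v := pvCell board yx.1 yx.2
    if decide (v ≠ 0) && (PySem.List.slice pvCellsB (some (j - PySem.Int.mod j 9)) (some j)).any
        (fun c => pvCell board c.1 c.2 == v) then false
    else pvBLoop board rest

def validate_nonets_alt (board : List (List Int)) : Bool :=
  pvBLoop board (PySem.List.enumerate pvCellsB 0)

-- ===== PRECONDITION & SPEC =====
-- A's traversal order over the 81 cells (x-block outer, then y-block, row-major inside a nonet)
def pvTau : List (Nat × Nat) := [(0, 0), (0, 1), (0, 2), (1, 0), (1, 1), (1, 2), (2, 0), (2, 1), (2, 2), (3, 0), (3, 1), (3, 2), (4, 0), (4, 1), (4, 2), (5, 0), (5, 1), (5, 2), (6, 0), (6, 1), (6, 2), (7, 0), (7, 1), (7, 2), (8, 0), (8, 1), (8, 2), (0, 3), (0, 4), (0, 5), (1, 3), (1, 4), (1, 5), (2, 3), (2, 4), (2, 5), (3, 3), (3, 4), (3, 5), (4, 3), (4, 4), (4, 5), (5, 3), (5, 4), (5, 5), (6, 3), (6, 4), (6, 5),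 (7, 3), (7, 4), (7, 5), (8, 3), (8, 4), (8, 5), (0, 6), (0, 7), (0, 8), (1, 6), (1, 7), (1, 8), (2, 6), (2, 7), (2, 8), (3, 6), (3, 7), (3, 8), (4, 6), (4, 7), (4, 8), (5, 6), (5, 7), (5, 8), (6, 6), (6, 7), (6, 8), (7, 6), (7, 7), (7, 8), (8, 6), (8, 7), (8, 8)]

def pvHas (board : List (List Int)) (p : Nat × Nat) : Prop :=
  p.1 < board.length ∧ p.2 < (board.getD p.1 []).length

def pvVal (board : List (List Int)) (p : Nat × Nat) : Int :=
  (board.getD p.1 []).getD p.2 0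

def pvNonet (p : Nat × Nat) : Nat := (p.1 / 3) * 3 + p.2 / 3

-- Pre_ is exactly where A (and B, which reads the same cells in the same order) returns:
-- either the whole 9x9 window is present, or some nonet duplicate occurs no later than the
-- first missing cell in the traversal order (the early False precedes the IndexError);
-- on all other boards both Pythons raise IndexError.
def Pre_validate_nonets (board : List (List Int)) : Prop :=
  (∀ p ∈ pvTau, pvHas board p) ∨
  (∃ k < 81, (∀ i ≤ k, pvHas board (pvTau.getD i (0, 0))) ∧
    pvVal board (pvTau.getD k (0, 0)) ≠ 0 ∧
    ∃ j < k, pvNonet (pvTau.getD j (0, 0)) = pvNonet (pvTau.getD k (0, 0)) ∧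
      pvVal board (pvTau.getD j (0, 0)) = pvVal board (pvTau.getD k (0, 0)))
instance (board : List (List Int)) : Decidable (Pre_validate_nonets board) := by
  unfold Pre_validate_nonets pvHas; infer_instance

def pvWitness_validate_nonets : List (List Int) :=
  List.replicate 9 [1, 2, 3, 4, 5, 6, 7, 8, 9]

def Spec_validate_nonets (board : List (List Int)) (out : Bool) : Prop := out = validate_nonets_alt board
instance (board : List (List Int)) (out : Bool) : Decidable (Spec_validate_nonets board out) := by unfold Spec_validate_nonets; infer_instance

-- ===== CLAIM =====
def Claim_equal_validate_nonets : Prop := ∀ (board : List (List Int)), Dom_validate_nonets board → Pre_validate_nonets board → Spec_validate_nonets board (validate_nonets board)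

-- ===== LEMMAS AND PROOFS =====

-- one nonet's nonzero values in row-major reading order (shared shape of both sides)
def pvLk (board : List (List Int)) (ys xs : List Int) : List Int :=
  ys.flatMap (fun y => (xs.map (fun x => pvCell board y x)).filter (fun v => decide (v ≠ 0)))

-- A's set-scan, flattened: add the values one by one, none at the first duplicate
def pvAddAll (s : PySem.Set Int) : List Int → Option (PySem.Set Int)
  | [] => some s
  | v :: rest =>
    if PySem.Set.contains s v then none else pvAddAll (PySem.Set.add s v) rest

theorem pvRowLoop_eq (board : List (List Int)) (y : Int) (xs : List Int) (s : PySem.Set Int) :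
    pvRowLoop board y xs s
      = pvAddAll s ((xs.map (fun x => pvCell board y x)).filter (fun v => decide (v ≠ 0))) := by
  induction xs generalizing s with
  | nil => rfl
  | cons x rest ih =>
    simp only [pvRowLoop, List.map_cons, List.filter_cons]
    by_cases h : pvCell board y x ≠ 0
    · rw [if_pos h]
      have hd : decide (pvCell board y x ≠ 0) = true := by simp [h]
      rw [hd, if_pos rfl]
      simp only [pvAddAll]
      split_ifs <;> simp [ih]
    · have hd : decide (pvCell board y x ≠ 0) = false := by simp_all
      rw [if_neg h, hd, if_neg (by simp)]
      exact ih s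

theorem pvAddAll_append (s : PySem.Set Int) (l1 l2 : List Int) :
    pvAddAll s (l1 ++ l2) = (pvAddAll s l1).bind (fun s' => pvAddAll s' l2) := by
  induction l1 generalizing s with
  | nil => rfl
  | cons v rest ih =>
    simp only [List.cons_append, pvAddAll]
    split_ifs <;> simp [ih]

theorem pvNonetLoop_eq (board : List (List Int)) (ys xs : List Int) (s : PySem.Set Int) :
    pvNonetLoop board ys xs s = (pvAddAll s (pvLk board ys xs)).isSome := by
  induction ys generalizing s with
  | nil => rfl
  | cons y rest ih =>
    simp only [pvNonetLoop, pvLk, List.flatMap_cons, pvAddAll_append]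
    rw [pvRowLoop_eq]
    cases pvAddAll s ((xs.map (fun x => pvCell board y x)).filter (fun v => decide (v ≠ 0))) with
    | none => rfl
    | some s' => simpa [pvLk] using ih s'

-- the set scan succeeds iff the value list is duplicate-free and disjoint from the seed set
theorem pvAddAll_isSome (l : List Int) (s : PySem.Set Int) :
    (pvAddAll s l).isSome = true ↔ l.Nodup ∧ ∀ v ∈ l, v ∉ s := by
  induction l generalizing s with
  | nil => simp [pvAddAll]
  | cons v rest ih =>
    simp only [pvAddAll]
    by_cases h : v ∈ s
    · rw [if_pos (by simpa [PySem.Set.contains] using List.elem_eq_true_of_mem h)]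
      simp only [Option.isSome_none, Bool.false_eq_true, false_iff, not_and]
      intro _ hall
      exact (hall v (by simp)) h
    · rw [if_neg (by simpa [PySem.Set.contains] using fun hc => h (List.mem_of_elem_eq_true hc))]
      rw [ih, PySem.Set.add_of_not_mem h]
      constructor
      · rintro ⟨hnd, hall⟩
        refine ⟨List.nodup_cons.mpr ⟨fun hv => (hall v hv) (List.mem_append_right _ (by simp)), hnd⟩, ?_⟩
        intro w hw
        rcases List.mem_cons.mp hw with rfl | hw'
        · exact h
        · exact fun hws => (hall w hw') (List.mem_append_left _ hws)
      · rintro ⟨hnd, hall⟩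
        rcases List.nodup_cons.mp hnd with ⟨hvr, hr⟩
        refine ⟨hr, fun w hw hws => ?_⟩
        rcases List.mem_append.mp hws with h1 | h1
        · exact hall w (List.mem_cons_of_mem _ hw) h1
        · exact hvr ((List.mem_singleton.mp h1) ▸ hw)

-- B's backward pairwise scan of one nonet, with the already-passed cells accumulated
def pvBack (board : List (List Int)) (done todo : List (Int × Int)) : Bool :=
  match todo with
  | [] => true
  | c :: rest =>
    let v := pvCell board c.1 c.2
    if decide (v ≠ 0) && done.any (fun c2 => pvCell board c2.1 c2.2 == v) then false
    else pvBack board (done ++ [c]) rest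

-- the backward scan succeeds iff the nonzero values are duplicate-free and unseen in 'done'
theorem pvBack_iff (board : List (List Int)) (todo : List (Int × Int)) :
    ∀ done : List (Int × Int),
    (pvBack board done todo = true ↔
      ((todo.map (fun c => pvCell board c.1 c.2)).filter (fun v => decide (v ≠ 0))).Nodup ∧
      ∀ v ∈ (todo.map (fun c => pvCell board c.1 c.2)).filter (fun v => decide (v ≠ 0)),
        v ∉ done.map (fun c => pvCell board c.1 c.2)) := by
  induction todo with
  | nil => simp [pvBack]
  | cons c rest ih =>
    intro done
    simp only [pvBack, List.map_cons, List.filter_cons]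
    by_cases hv : pvCell board c.1 c.2 ≠ 0
    · have hd : decide (pvCell board c.1 c.2 ≠ 0) = true := by simp [hv]
      rw [hd, if_pos rfl]
      by_cases hmem : pvCell board c.1 c.2 ∈ done.map (fun c => pvCell board c.1 c.2)
      · have hany : done.any (fun c2 => pvCell board c2.1 c2.2 == pvCell board c.1 c.2) = true := by
          rcases List.mem_map.mp hmem with ⟨c2, hc2, he⟩
          exact List.any_eq_true.mpr ⟨c2, hc2, by simp [he]⟩
        rw [Bool.true_and, hany, if_pos rfl]
        simp only [Bool.false_eq_true, false_iff, not_and]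
        intro _ hall
        exact (hall _ (List.mem_cons_self)) hmem
      · have hany : done.any (fun c2 => pvCell board c2.1 c2.2 == pvCell board c.1 c.2) = false := by
          rw [Bool.eq_false_iff]
          intro hc
          rcases List.any_eq_true.mp hc with ⟨c2, hc2, he⟩
          exact hmem (List.mem_map.mpr ⟨c2, hc2, (beq_iff_eq.mp he)⟩)
        rw [Bool.true_and, hany, if_neg (by simp)]
        rw [ih (done ++ [c])]
        simp only [List.map_append, List.map_cons, List.map_nil]
        constructor
        · rintro ⟨hnd, hall⟩
          refine ⟨List.nodup_cons.mpr ⟨fun hvm => (hall _ hvm) (List.mem_append_right _ (by simp)), hnd⟩, ?_⟩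
          intro w hw
          rcases List.mem_cons.mp hw with rfl | hw'
          · exact hmem
          · exact fun hws => (hall w hw') (List.mem_append_left _ hws)
        · rintro ⟨hnd, hall⟩
          rcases List.nodup_cons.mp hnd with ⟨hvr, hr⟩
          refine ⟨hr, fun w hw hws => ?_⟩
          rcases List.mem_append.mp hws with h1 | h1
          · exact hall w (List.mem_cons_of_mem _ hw) h1
          · exact hvr ((List.mem_singleton.mp h1) ▸ hw)
    · have hd : decide (pvCell board c.1 c.2 ≠ 0) = false := by simp_all
      rw [hd, Bool.false_and, if_neg (by simp)]
      rw [ih (done ++ [c])]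
      have hz : pvCell board c.1 c.2 = 0 := by simpa using hv
      simp only [List.map_append, List.map_cons, List.map_nil]
      constructor
      · rintro ⟨hnd, hall⟩
        refine ⟨hnd, fun w hw hws => (hall w hw) (List.mem_append_left _ hws)⟩
      · rintro ⟨hnd, hall⟩
        refine ⟨hnd, fun w hw hws => ?_⟩
        rcases List.mem_append.mp hws with h1 | h1
        · exact (hall w hw) h1
        · have hw0 : w ≠ 0 := by
            have := List.of_mem_filter hw
            simpa using this
          exact hw0 ((List.mem_singleton.mp h1) ▸ hz)

-- per-nonet bridge: A's set scan succeeds iff B's backward pairwise scan does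
theorem pvSegEq (board : List (List Int)) (R C : List Int) (seg : List (Int × Int))
    (h : pvLk board R C
        = (seg.map (fun c => pvCell board c.1 c.2)).filter (fun v => decide (v ≠ 0))) :
    (pvAddAll PySem.Set.empty (pvLk board R C)).isSome = pvBack board [] seg := by
  have h1 := pvAddAll_isSome (pvLk board R C) PySem.Set.empty
  have h2 := pvBack_iff board seg []
  rw [h] at h1
  cases hA : (pvAddAll PySem.Set.empty (pvLk board R C)).isSome <;>
    cases hB : pvBack board [] seg <;>
      simp_all [PySem.Set.empty]

-- the flat loop, processed one nonet block at a time
theorem pvBLoop_seg (board : List (List Int)) (todo : List (Int × Int)) :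
    ∀ (ecs : List (Int × (Int × Int))) (done : List (Int × Int))
      (rest : List (Int × (Int × Int))),
    ecs.length = todo.length →
    (∀ i : Nat, i < todo.length →
      (ecs.getD i (0, (0, 0))).2 = todo.getD i (0, 0) ∧
      PySem.List.slice pvCellsB
          (some ((ecs.getD i (0, (0, 0))).1 - PySem.Int.mod (ecs.getD i (0, (0, 0))).1 9))
          (some (ecs.getD i (0, (0, 0))).1)
        = done ++ todo.take i) →
    pvBLoop board (ecs ++ rest) = (pvBack board done todo && pvBLoop board rest) := by
  induction todo with
  | nil =>
    intro ecs done rest hlen _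
    rw [List.length_eq_zero_iff.mp hlen]
    simp [pvBack]
  | cons c todo' ih =>
    intro ecs done rest hlen hsteps
    cases ecs with
    | nil => simp at hlen
    | cons e ecs' =>
      obtain ⟨j, yx⟩ := e
      obtain ⟨hyx, hslice⟩ := hsteps 0 (by simp)
      simp only [List.getD_cons_zero, List.take_zero, List.append_nil] at hyx hslice
      have h1 : ecs'.length = todo'.length := by simpa using hlen
      have h2 : ∀ i : Nat, i < todo'.length →
          (ecs'.getD i (0, (0, 0))).2 = todo'.getD i (0, 0) ∧
          PySem.List.slice pvCellsB
              (some ((ecs'.getD i (0, (0, 0))).1 - PySem.Int.mod (ecs'.getD i (0, (0, 0))).1 9))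
              (some (ecs'.getD i (0, (0, 0))).1)
            = (done ++ [c]) ++ todo'.take i := by
        intro i hi
        have h3 := hsteps (i + 1) (by simpa using Nat.succ_lt_succ hi)
        simp only [List.getD_cons_succ, List.take_succ_cons] at h3
        refine ⟨h3.1, ?_⟩
        rw [h3.2]
        simp
      simp only [List.cons_append, pvBLoop, pvBack, hslice, hyx]
      split_ifs with hcond
      · simp
      · rw [ih ecs' (done ++ [c]) rest h1 h2]

def pvS0 : List (Int × Int) := [((0 : Int), (0 : Int)), ((0 : Int), (1 : Int)), ((0 : Int), (2 : Int)), ((1 : Int), (0 : Int)), ((1 : Int), (1 : Int)), ((1 : Int), (2 : Int)), ((2 : Int), (0 : Int)), ((2 : Int), (1 : Int)), ((2 : Int), (2 : Int))]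
def pvE0 : List (Int × (Int × Int)) := [((0 : Int), ((0 : Int), (0 : Int))), ((1 : Int), ((0 : Int), (1 : Int))), ((2 : Int), ((0 : Int), (2 : Int))), ((3 : Int), ((1 : Int), (0 : Int))), ((4 : Int), ((1 : Int), (1 : Int))), ((5 : Int), ((1 : Int), (2 : Int))), ((6 : Int), ((2 : Int), (0 : Int))), ((7 : Int), ((2 : Int), (1 : Int))), ((8 : Int), ((2 : Int), (2 : Int)))]
def pvS1 : List (Int × Int) := [((3 : Int), (0 : Int)), ((3 : Int), (1 : Int)), ((3 : Int), (2 : Int)), ((4 : Int), (0 : Int)), ((4 : Int), (1 : Int)), ((4 : Int), (2 : Int)), ((5 : Int), (0 : Int)), ((5 : Int), (1 : Int)), ((5 : Int), (2 : Int))]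
def pvE1 : List (Int × (Int × Int)) := [((9 : Int), ((3 : Int), (0 : Int))), ((10 : Int), ((3 : Int), (1 : Int))), ((11 : Int), ((3 : Int), (2 : Int))), ((12 : Int), ((4 : Int), (0 : Int))), ((13 : Int), ((4 : Int), (1 : Int))), ((14 : Int), ((4 : Int), (2 : Int))), ((15 : Int), ((5 : Int), (0 : Int))), ((16 : Int), ((5 : Int), (1 : Int))), ((17 : Int), ((5 : Int), (2 : Int)))]
def pvS2 : List (Int × Int) := [((6 : Int), (0 : Int)), ((6 : Int), (1 : Int)), ((6 : Int), (2 : Int)), ((7 : Int), (0 : Int)), ((7 : Int), (1 : Int)), ((7 : Int), (2 : Int)), ((8 : Int), (0 : Int)), ((8 : Int), (1 : Int)), ((8 : Int), (2 : Int))]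
def pvE2 : List (Int × (Int × Int)) := [((18 : Int), ((6 : Int), (0 : Int))), ((19 : Int), ((6 : Int), (1 : Int))), ((20 : Int), ((6 : Int), (2 : Int))), ((21 : Int), ((7 : Int), (0 : Int))), ((22 : Int), ((7 : Int), (1 : Int))), ((23 : Int), ((7 : Int), (2 : Int))), ((24 : Int), ((8 : Int), (0 : Int))), ((25 : Int), ((8 : Int), (1 : Int))), ((26 : Int), ((8 : Int), (2 : Int)))]
def pvS3 : List (Int × Int) := [((0 : Int), (3 : Int)), ((0 : Int), (4 : Int)), ((0 : Int), (5 : Int)), ((1 : Int), (3 : Int)), ((1 : Int), (4 : Int)), ((1 : Int), (5 : Int)), ((2 : Int), (3 : Int)), ((2 : Int), (4 : Int)), ((2 : Int), (5 : Int))]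
def pvE3 : List (Int × (Int × Int)) := [((27 : Int), ((0 : Int), (3 : Int))), ((28 : Int), ((0 : Int), (4 : Int))), ((29 : Int), ((0 : Int), (5 : Int))), ((30 : Int), ((1 : Int), (3 : Int))), ((31 : Int), ((1 : Int), (4 : Int))), ((32 : Int), ((1 : Int), (5 : Int))), ((33 : Int), ((2 : Int), (3 : Int))), ((34 : Int), ((2 : Int), (4 : Int))), ((35 : Int), ((2 : Int), (5 : Int)))]
def pvS4 : List (Int × Int) := [((3 : Int), (3 : Int)), ((3 : Int), (4 : Int)), ((3 : Int), (5 : Int)), ((4 : Int), (3 : Int)), ((4 : Int), (4 : Int)), ((4 : Int), (5 : Int)), ((5 : Int), (3 : Int)), ((5 : Int), (4 : Int)), ((5 : Int), (5 : Int))]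
def pvE4 : List (Int × (Int × Int)) := [((36 : Int), ((3 : Int), (3 : Int))), ((37 : Int), ((3 : Int), (4 : Int))), ((38 : Int), ((3 : Int), (5 : Int))), ((39 : Int), ((4 : Int), (3 : Int))), ((40 : Int), ((4 : Int), (4 : Int))), ((41 : Int), ((4 : Int), (5 : Int))), ((42 : Int), ((5 : Int), (3 : Int))), ((43 : Int), ((5 : Int), (4 : Int))), ((44 : Int), ((5 : Int), (5 : Int)))]
def pvS5 : List (Int × Int) := [((6 : Int), (3 : Int)), ((6 : Int), (4 : Int)), ((6 : Int), (5 : Int)), ((7 : Int), (3 : Int)), ((7 : Int), (4 : Int)), ((7 : Int), (5 : Int)), ((8 : Int), (3 : Int)), ((8 : Int), (4 : Int)), ((8 : Int), (5 : Int))]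
def pvE5 : List (Int × (Int × Int)) := [((45 : Int), ((6 : Int), (3 : Int))), ((46 : Int), ((6 : Int), (4 : Int))), ((47 : Int), ((6 : Int), (5 : Int))), ((48 : Int), ((7 : Int), (3 : Int))), ((49 : Int), ((7 : Int), (4 : Int))), ((50 : Int), ((7 : Int), (5 : Int))), ((51 : Int), ((8 : Int), (3 : Int))), ((52 : Int), ((8 : Int), (4 : Int))), ((53 : Int), ((8 : Int), (5 : Int)))]
def pvS6 : List (Int × Int) := [((0 : Int), (6 : Int)), ((0 : Int), (7 : Int)), ((0 : Int), (8 : Int)), ((1 : Int), (6 : Int)), ((1 : Int), (7 : Int)), ((1 : Int), (8 : Int)), ((2 : Int), (6 : Int)), ((2 : Int), (7 : Int)), ((2 : Int), (8 : Int))]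
def pvE6 : List (Int × (Int × Int)) := [((54 : Int), ((0 : Int), (6 : Int))), ((55 : Int), ((0 : Int), (7 : Int))), ((56 : Int), ((0 : Int), (8 : Int))), ((57 : Int), ((1 : Int), (6 : Int))), ((58 : Int), ((1 : Int), (7 : Int))), ((59 : Int), ((1 : Int), (8 : Int))), ((60 : Int), ((2 : Int), (6 : Int))), ((61 : Int), ((2 : Int), (7 : Int))), ((62 : Int), ((2 : Int), (8 : Int)))]
def pvS7 : List (Int × Int) := [((3 : Int), (6 : Int)), ((3 : Int), (7 : Int)), ((3 : Int), (8 : Int)), ((4 : Int), (6 : Int)), ((4 : Int), (7 : Int)), ((4 : Int), (8 : Int)), ((5 : Int), (6 : Int)), ((5 : Int), (7 : Int)), ((5 : Int), (8 : Int))]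
def pvE7 : List (Int × (Int × Int)) := [((63 : Int), ((3 : Int), (6 : Int))), ((64 : Int), ((3 : Int), (7 : Int))), ((65 : Int), ((3 : Int), (8 : Int))), ((66 : Int), ((4 : Int), (6 : Int))), ((67 : Int), ((4 : Int), (7 : Int))), ((68 : Int), ((4 : Int), (8 : Int))), ((69 : Int), ((5 : Int), (6 : Int))), ((70 : Int), ((5 : Int), (7 : Int))), ((71 : Int), ((5 : Int), (8 : Int)))]
def pvS8 : List (Int × Int) := [((6 : Int), (6 : Int)), ((6 : Int), (7 : Int)), ((6 : Int), (8 : Int)), ((7 : Int), (6 : Int)), ((7 : Int), (7 : Int)), ((7 : Int), (8 : Int)), ((8 : Int), (6 : Int)), ((8 : Int), (7 : Int)), ((8 : Int), (8 : Int))]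
def pvE8 : List (Int × (Int × Int)) := [((72 : Int), ((6 : Int), (6 : Int))), ((73 : Int), ((6 : Int), (7 : Int))), ((74 : Int), ((6 : Int), (8 : Int))), ((75 : Int), ((7 : Int), (6 : Int))), ((76 : Int), ((7 : Int), (7 : Int))), ((77 : Int), ((7 : Int), (8 : Int))), ((78 : Int), ((8 : Int), (6 : Int))), ((79 : Int), ((8 : Int), (7 : Int))), ((80 : Int), ((8 : Int), (8 : Int)))]

-- reassociating the nine per-nonet conjuncts (both sides list the nonets in the same order)
theorem pvShape9 (a b c d e f g h i : Bool) :
    (a && (b && (c && true)) && (d && (e && (f && true)) && (g && (h && (i && true)) && true)))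
      = (a && (b && (c && (d && (e && (f && (g && (h && (i && true))))))))) := by
  revert a b c d e f g h i; decide

-- ===== VERDICT =====
set_option maxHeartbeats 1000000 in
theorem validate_nonets_spec : Claim_equal_validate_nonets := by
  intro board _ _
  unfold Spec_validate_nonets
  have h93 : PySem.List.pyRange 0 9 3 = [0, 3, 6] := by decide
  have hf0 : find_nonet_range 0 = [0, 1, 2] := by decide
  have hf3 : find_nonet_range 3 = [3, 4, 5] := by decide
  have hf6 : find_nonet_range 6 = [6, 7, 8] := by decide
  have hE : PySem.List.enumerate pvCellsB 0
      = pvE0 ++ (pvE1 ++ (pvE2 ++ (pvE3 ++ (pvE4 ++ (pvE5 ++ (pvE6 ++ (pvE7 ++ (pvE8 ++ ([] : List (Int × (Int × Int))))))))))) := by decide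
  simp only [validate_nonets, h93, List.all_cons, List.all_nil, hf0, hf3, hf6, pvNonetLoop_eq]
  rw [show validate_nonets_alt board
      = pvBLoop board (pvE0 ++ (pvE1 ++ (pvE2 ++ (pvE3 ++ (pvE4 ++ (pvE5 ++ (pvE6 ++ (pvE7 ++ (pvE8 ++ ([] : List (Int × (Int × Int))))))))))))
    from by rw [validate_nonets_alt, hE]]
  rw [pvBLoop_seg board pvS0 pvE0 [] _ (by decide) (by decide)]
  rw [pvBLoop_seg board pvS1 pvE1 [] _ (by decide) (by decide)]
  rw [pvBLoop_seg board pvS2 pvE2 [] _ (by decide) (by decide)]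
  rw [pvBLoop_seg board pvS3 pvE3 [] _ (by decide) (by decide)]
  rw [pvBLoop_seg board pvS4 pvE4 [] _ (by decide) (by decide)]
  rw [pvBLoop_seg board pvS5 pvE5 [] _ (by decide) (by decide)]
  rw [pvBLoop_seg board pvS6 pvE6 [] _ (by decide) (by decide)]
  rw [pvBLoop_seg board pvS7 pvE7 [] _ (by decide) (by decide)]
  rw [pvBLoop_seg board pvS8 pvE8 [] _ (by decide) (by decide)]
  rw [show pvBLoop board [] = true from rfl]
  have hq0 : (pvAddAll PySem.Set.empty (pvLk board ([0, 1, 2] : List Int) ([0, 1, 2] : List Int))).isSome = pvBack board [] pvS0 :=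
    pvSegEq board _ _ _ (by simp [pvLk, pvS0, ← List.filter_append])
  have hq1 : (pvAddAll PySem.Set.empty (pvLk board ([3, 4, 5] : List Int) ([0, 1, 2] : List Int))).isSome = pvBack board [] pvS1 :=
    pvSegEq board _ _ _ (by simp [pvLk, pvS1, ← List.filter_append])
  have hq2 : (pvAddAll PySem.Set.empty (pvLk board ([6, 7, 8] : List Int) ([0, 1, 2] : List Int))).isSome = pvBack board [] pvS2 :=
    pvSegEq board _ _ _ (by simp [pvLk, pvS2, ← List.filter_append])
  have hq3 : (pvAddAll PySem.Set.empty (pvLk board ([0, 1, 2] : List Int) ([3, 4, 5] : List Int))).isSome = pvBack board [] pvS3 :=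
    pvSegEq board _ _ _ (by simp [pvLk, pvS3, ← List.filter_append])
  have hq4 : (pvAddAll PySem.Set.empty (pvLk board ([3, 4, 5] : List Int) ([3, 4, 5] : List Int))).isSome = pvBack board [] pvS4 :=
    pvSegEq board _ _ _ (by simp [pvLk, pvS4, ← List.filter_append])
  have hq5 : (pvAddAll PySem.Set.empty (pvLk board ([6, 7, 8] : List Int) ([3, 4, 5] : List Int))).isSome = pvBack board [] pvS5 :=
    pvSegEq board _ _ _ (by simp [pvLk, pvS5, ← List.filter_append])
  have hq6 : (pvAddAll PySem.Set.empty (pvLk board ([0, 1, 2] : List Int) ([6, 7, 8] : List Int))).isSome = pvBack board [] pvS6 :=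
    pvSegEq board _ _ _ (by simp [pvLk, pvS6, ← List.filter_append])
  have hq7 : (pvAddAll PySem.Set.empty (pvLk board ([3, 4, 5] : List Int) ([6, 7, 8] : List Int))).isSome = pvBack board [] pvS7 :=
    pvSegEq board _ _ _ (by simp [pvLk, pvS7, ← List.filter_append])
  have hq8 : (pvAddAll PySem.Set.empty (pvLk board ([6, 7, 8] : List Int) ([6, 7, 8] : List Int))).isSome = pvBack board [] pvS8 :=
    pvSegEq board _ _ _ (by simp [pvLk, pvS8, ← List.filter_append])
  rw [hq0, hq1, hq2, hq3, hq4, hq5, hq6, hq7, hq8]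
  exact pvShape9 _ _ _ _ _ _ _ _ _
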